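-- pv_equiv track=rewrite | github.com/danipy2/leet | 2551-apply-operations-to-an-array/apply-operations-to-an-array.py | applyOperations
-- ===== SOURCE A (Python) =====
-- from typing import List
--
-- def applyOperations(nums: List[int]) -> List[int]:
--     i = 0
--     while i < len(nums)-1:
--         if nums[i] == nums[i+1]:
--             nums[i] *=2
--             nums[i+1] = 0
--             i+=1
--         i+=1
--     l = 0
--     for i in range(len(nums)):
--         if nums[i] != 0:
--             nums[i],nums[l] = nums[l],nums[i]
--             l+=1
--     return nums
-- ===== SOURCE B (Python) =====
-- from typing import List
--
-- def applyOperations(nums: List[int]) -> List[int]: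
--     n = len(nums)
--     for i in range(n - 1):
--         if nums[i] == nums[i + 1]:
--             nums[i] *= 2
--             nums[i + 1] = 0
--     nonzeros = [x for x in nums if x != 0]
--     nums[:] = nonzeros + [0] * (n - len(nonzeros))
--     return nums
-- ===== Notes on version B (the rewrite author's own statement) =====
-- stated objective: simpler
-- what changed: B replaces A's skip-ahead while loop with a plain adjacent-pair scan (doubling a freshly-zeroed cell is a no-op) and replaces A's in-place two-pointer swap partition with building the nonzero sublist once and padding it with zeros.
import Mathlib
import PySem

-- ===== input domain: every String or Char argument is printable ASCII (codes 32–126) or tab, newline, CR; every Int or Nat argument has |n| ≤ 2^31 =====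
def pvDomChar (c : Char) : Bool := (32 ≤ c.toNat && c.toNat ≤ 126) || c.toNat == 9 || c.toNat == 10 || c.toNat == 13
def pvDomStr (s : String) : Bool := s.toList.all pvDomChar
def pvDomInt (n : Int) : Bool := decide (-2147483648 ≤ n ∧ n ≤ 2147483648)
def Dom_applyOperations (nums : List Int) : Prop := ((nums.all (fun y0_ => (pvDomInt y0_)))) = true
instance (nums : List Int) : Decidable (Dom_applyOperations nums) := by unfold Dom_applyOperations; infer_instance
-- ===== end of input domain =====

-- B replaces A's skip-ahead while loop with a plain adjacent scan and A's in-place swap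
-- partition with filter-nonzeros-then-pad (objective: simpler). Both Pythons mutate the
-- argument list in place identically; the theorems here are about the return value.

-- ===== PORT A =====
-- while i < len(nums)-1: if nums[i]==nums[i+1]: nums[i]*=2; nums[i+1]=0; i+=1 ; i+=1
def opsA (nums : List Int) (i : Nat) : List Int :=
  if i + 1 < nums.length then
    if nums.getD i 0 = nums.getD (i+1) 0 then
      opsA ((nums.set i (2 * nums.getD i 0)).set (i+1) 0) (i+2)
    else
      opsA nums (i+1)
  else nums
termination_by nums.length - i
decreasing_by all_goals first | omega | (simp only [List.length_set]; omega)

-- l = 0; for i in range(len(nums)): if nums[i] != 0: nums[i],nums[l] = nums[l],nums[i]; l+=1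
def swapA (nums : List Int) (i l : Nat) : List Int :=
  if i < nums.length then
    if nums.getD i 0 ≠ 0 then
      swapA ((nums.set i (nums.getD l 0)).set l (nums.getD i 0)) (i+1) (l+1)
    else
      swapA nums (i+1) l
  else nums
termination_by nums.length - i
decreasing_by all_goals first | omega | (simp only [List.length_set]; omega)

def applyOperations (nums : List Int) : List Int :=
  swapA (opsA nums 0) 0 0

-- ===== PORT B =====
-- for i in range(n - 1): if nums[i]==nums[i+1]: nums[i]*=2; nums[i+1]=0
def opsB (nums : List Int) (i : Nat) : List Int :=
  if i + 1 < nums.length then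
    if nums.getD i 0 = nums.getD (i+1) 0 then
      opsB ((nums.set i (2 * nums.getD i 0)).set (i+1) 0) (i+1)
    else
      opsB nums (i+1)
  else nums
termination_by nums.length - i
decreasing_by all_goals first | omega | (simp only [List.length_set]; omega)

-- nonzeros = [x for x in nums if x != 0]; nums[:] = nonzeros + [0]*(n - len(nonzeros))
def applyOperations_alt (nums : List Int) : List Int :=
  let n := nums.length
  let ops := opsB nums 0
  let nonzeros := ops.filter (fun x => x != 0)
  nonzeros ++ List.replicate (n - nonzeros.length) 0

-- ===== PRECONDITION & SPEC =====
def Spec_applyOperations (nums : List Int) (out : List Int) : Prop := out = applyOperations_alt nums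
instance (nums : List Int) (out : List Int) : Decidable (Spec_applyOperations nums out) := by unfold Spec_applyOperations; infer_instance

-- ===== CLAIM (what is proved, stated in full; the proofs are below) =====
def Claim_equal_applyOperations : Prop := ∀ (nums : List Int), Dom_applyOperations nums → Spec_applyOperations nums (applyOperations nums)

-- ===== LEMMAS AND PROOFS =====

-- setting a cell to the value it already holds is the identity
theorem set_getD_self (l : List Int) (i : Nat) : l.set i (l.getD i 0) = l := by
  by_cases h : i < l.length
  · rw [l.getD_eq_getElem 0 h, List.set_getElem_self]
  · exact List.set_eq_of_length_le (by omega)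

theorem ops_len (nums : List Int) (i : Nat) : (opsB nums i).length = nums.length := by
  induction nums, i using opsB.induct with
  | case1 nums i h1 h2 ih => rw [opsB, if_pos h1, if_pos h2]; simpa using ih
  | case2 nums i h1 h2 ih => rw [opsB, if_pos h1, if_neg h2]; exact ih
  | case3 nums i h1 => rw [opsB, if_neg h1]

-- stepping B's scan past a freshly-zeroed cell does nothing
theorem opsB_skip (nums : List Int) (i : Nat) (h0 : nums.getD (i+1) 0 = 0) :
    opsB nums (i+1) = opsB nums (i+2) := by
  rw [opsB]
  by_cases h1 : i + 1 + 1 < nums.length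
  · rw [if_pos h1]
    by_cases h2 : nums.getD (i+1) 0 = nums.getD (i+1+1) 0
    · rw [if_pos h2]
      have e1 : nums.set (i+1) (2 * nums.getD (i+1) 0) = nums := by
        calc nums.set (i+1) (2 * nums.getD (i+1) 0)
            = nums.set (i+1) (nums.getD (i+1) 0) := by rw [h0]; norm_num
          _ = nums := set_getD_self nums (i+1)
      rw [e1]
      have e2 : nums.set (i+1+1) 0 = nums := by
        calc nums.set (i+1+1) (0 : Int)
            = nums.set (i+1+1) (nums.getD (i+1+1) 0) := by rw [← h2, h0]
          _ = nums := set_getD_self nums (i+1+1)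
      rw [e2]
    · rw [if_neg h2]
  · rw [if_neg h1]
    conv_rhs => rw [opsB, if_neg (show ¬ i + 2 + 1 < nums.length by omega)]

theorem ops_eq (nums : List Int) (i : Nat) : opsA nums i = opsB nums i := by
  induction nums, i using opsA.induct with
  | case1 nums i h1 h2 ih =>
    rw [opsA, if_pos h1, if_pos h2, ih]
    conv_rhs => rw [opsB, if_pos h1, if_pos h2]
    have hz : ((nums.set i (2 * nums.getD i 0)).set (i+1) 0).getD (i+1) 0 = 0 := by
      simp [List.getD_eq_getElem?_getD, h1]
    exact (opsB_skip _ i hz).symm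
  | case2 nums i h1 h2 ih =>
    rw [opsA, if_pos h1, if_neg h2, ih]
    conv_rhs => rw [opsB, if_pos h1, if_neg h2]
  | case3 nums i h1 =>
    rw [opsA, if_neg h1]
    conv_rhs => rw [opsB, if_neg h1]

theorem countP_split (l : List Int) :
    l.countP (fun x => x == 0) + (l.filter (fun x => x != 0)).length = l.length := by
  rw [← List.countP_eq_length_filter]
  induction l with
  | nil => rfl
  | cons x t ih => by_cases h : x = 0 <;> simp [h] <;> omega

theorem swap_spec : ∀ (nums : List Int) (i l : Nat), l ≤ i → i ≤ nums.length →
    (∀ j, l ≤ j → j < i → nums.getD j 0 = 0) →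
    swapA nums i l = nums.take l ++ (nums.drop i).filter (fun x => x != 0)
      ++ List.replicate ((i - l) + (nums.drop i).countP (fun x => x == 0)) 0 := by
  intro nums i l
  induction nums, i, l using swapA.induct with
  | case1 nums i l h1 h2 ih =>
    intro hli hlen hz
    rw [swapA, if_pos h1, if_pos h2]
    have hlz : l < i → nums.getD l 0 = 0 := fun h => hz l (le_refl l) h
    have hinv : ∀ j, l + 1 ≤ j → j < i + 1 →
        (((nums.set i (nums.getD l 0)).set l (nums.getD i 0))).getD j 0 = 0 := by
      intro j hj1 hj2
      rcases Nat.lt_or_ge j i with hji | hji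
      · simp only [List.getD_eq_getElem?_getD, List.getElem?_set]
        simp only [show ¬ (l = j) from by omega, show ¬ (i = j) from by omega, if_false]
        exact hz j (by omega) hji
      · have hji' : j = i := by omega
        subst hji'
        have hlj : l < j := by omega
        simp only [List.getD_eq_getElem?_getD, List.getElem?_set]
        simp only [show ¬ (l = j) from by omega, if_false,
          List.length_set, if_pos h1]
        simpa using hlz hlj
    rw [ih (by omega) (by simp only [List.length_set]; omega) hinv]
    have F1 : ((nums.set i (nums.getD l 0)).set l (nums.getD i 0)).drop (i+1)
        = nums.drop (i+1) := by
      rw [List.drop_set_of_lt (by omega), List.drop_set_of_lt (by omega)]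
    have F2 : ((nums.set i (nums.getD l 0)).set l (nums.getD i 0)).take (l+1)
        = nums.take l ++ [nums.getD i 0] := by
      rw [List.take_add_one]
      congr 1
      · rw [List.take_set_of_le (le_refl l), List.take_set_of_le hli]
      · simp [List.length_set, show l < nums.length from by omega]
    have F3 : nums.drop i = nums.getD i 0 :: nums.drop (i+1) := by
      rw [List.drop_eq_getElem_cons h1, List.getD_eq_getElem nums 0 h1]
    rw [F1, F2, F3]
    have hne : ((nums.getD i 0) != 0) = true := by simpa using h2
    have hne' : ((nums.getD i 0) == 0) = false := by simpa using h2
    simp only [List.filter_cons, hne, List.countP_cons, hne', if_true]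
    simp only [List.append_assoc, List.cons_append, List.nil_append,
      show i + 1 - (l + 1) = i - l from by omega]
    simp
  | case2 nums i l h1 h2 ih =>
    intro hli hlen hz
    have h2' : nums.getD i 0 = 0 := by
      by_contra hc; exact h2 hc
    rw [swapA, if_pos h1, if_neg h2]
    rw [ih (by omega) (by omega) (by
      intro j hj1 hj2
      rcases Nat.lt_or_ge j i with hji | hji
      · exact hz j hj1 hji
      · have hji' : j = i := by omega
        subst hji'; exact h2')]
    have F3 : nums.drop i = 0 :: nums.drop (i+1) := by
      rw [List.drop_eq_getElem_cons h1, ← List.getD_eq_getElem nums 0 h1, h2']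
    rw [F3]
    simp only [List.filter_cons, List.countP_cons]
    norm_num
    rw [show i - l + (List.countP (fun x => (x == 0)) (List.drop (i+1) nums) + 1)
         = (i + 1 - l) + List.countP (fun x => (x == 0)) (List.drop (i+1) nums) from by omega]
  | case3 nums i l h1 =>
    intro hli hlen hz
    have hi : i = nums.length := by omega
    rw [swapA, if_neg h1]
    have hdrop : nums.drop l = List.replicate (nums.length - l) 0 := by
      rw [List.eq_replicate_iff]
      constructor
      · simp
      · intro b hb
        obtain ⟨k, hk, he⟩ := List.mem_iff_getElem.mp hb
        rw [List.getElem_drop] at he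
        have hkl : l + k < nums.length := by
          simp only [List.length_drop] at hk; omega
        rw [← he, ← List.getD_eq_getElem nums 0 hkl]
        exact hz (l + k) (by omega) (by omega)
    conv_lhs => rw [← List.take_append_drop l nums, hdrop]
    rw [show nums.drop i = [] from by simp [hi]]
    simp [hi]


-- ===== VERDICT (by name: the statement is the Claim_ definition above) =====
theorem applyOperations_spec : Claim_equal_applyOperations := by
  intro nums _
  unfold Spec_applyOperations applyOperations applyOperations_alt
  rw [ops_eq]
  have hlen : (opsB nums 0).length = nums.length := ops_len nums 0
  rw [swap_spec (opsB nums 0) 0 0 (le_refl 0) (by omega) (by intro j h1 h2; omega)]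
  simp only [List.take_zero, List.drop_zero, List.nil_append, Nat.sub_zero, Nat.zero_add]
  congr 2
  have := countP_split (opsB nums 0)
  omega
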